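-- pv_equiv track=rewrite | github.com/cuponomia/dojo | sudoku-2023-08-30/sudoku.py | solve_hidden_singles
-- ===== SOURCE A (Python) =====
-- def get_column(grid, col_number):
--     col = []
--     for i in range(len(grid[0])):
--         col.append(grid[i][col_number])
--     return col
--
-- def get_possible_digits_in_row(row):
--     possibles = range(1,len(row)+1)
--     return [x for x in possibles if x not in row]
--
-- def solve_hidden_singles(grid):
--     solved = 1
--     while solved > 0:
--         solved = 0
--         for i in range(len(grid)):
--             for j in range(len(grid[i])):
--                 point = grid[i][j]
--                 if point == 0:
--                     row_possibles = get_possible_digits_in_row(grid[i])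
--                     column_possibles = get_possible_digits_in_row(get_column(grid, j))
--
--                     possibles = [x for x in row_possibles if x in column_possibles]
--                     if len(possibles) == 1:
--                         grid[i][j] = possibles[0]
--                         solved = solved + 1
--     return grid
-- ===== SOURCE B (Python) =====
-- def solve_hidden_singles(grid):
--     n = len(grid)
--     m = max(map(len, grid), default=0)
--     row_used = [set(row) for row in grid]
--     col_used = [set(row[j] for row in grid if j < len(row)) for j in range(m)]
--     changed = True
--     while changed:
--         changed = False
--         for i in range(n):
--             for j in range(len(grid[i])):
--                 if grid[i][j] == 0:
--                     cands = [d for d in range(1, n + 1)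
--                              if d not in row_used[i] and d not in col_used[j]]
--                     if len(cands) == 1:
--                         d = cands[0]
--                         grid[i][j] = d
--                         row_used[i].add(d)
--                         col_used[j].add(d)
--                         changed = True
--     return grid
-- ===== Notes on version B (the rewrite author's own statement) =====
-- stated objective: faster
-- what changed: B maintains per-row and per-column used-digit sets built once and updated incrementally on each fill, so a cell's candidate test is one O(n) pass with O(1) set lookups instead of A's rebuilding the column and two possibles lists and intersecting them (O(n^2) per cell) on every visit.
-- outside the precondition, e.g. on solve_hidden_singles([[0], [1]]): A returns [[1], [1]], B returns [[2], [1]]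
import Mathlib
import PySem

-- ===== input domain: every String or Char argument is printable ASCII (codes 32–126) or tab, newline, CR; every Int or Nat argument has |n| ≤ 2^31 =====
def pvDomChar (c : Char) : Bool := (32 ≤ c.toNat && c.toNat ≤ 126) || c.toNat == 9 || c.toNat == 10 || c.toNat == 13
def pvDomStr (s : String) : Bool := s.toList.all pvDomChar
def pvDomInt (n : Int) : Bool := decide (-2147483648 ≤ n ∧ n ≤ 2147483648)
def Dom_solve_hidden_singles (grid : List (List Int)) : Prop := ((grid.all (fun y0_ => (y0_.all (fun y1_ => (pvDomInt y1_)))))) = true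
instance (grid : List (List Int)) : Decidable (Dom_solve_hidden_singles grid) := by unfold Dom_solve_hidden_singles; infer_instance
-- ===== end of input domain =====

-- B replaces A's per-cell rebuild of row/column "possible digit" lists by row/column used-digit
-- sets built once and updated incrementally on each fill. Both Pythons mutate `grid` in place and
-- return it; the theorems are about the returned value.

-- ===== PORT A =====
-- Python indexing grid[i][j] is ported with getD defaults; on Pre_ (square grids) every index A
-- evaluates is in range, so the ports are exact there. The Python while loops of both programs
-- stabilise within (#zero cells + 1) sweeps (every productive sweep writes a digit ≥ 1 into a
-- 0 cell), so that fuel makes the loop ports exact.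
def pvGetColumn (g : List (List Int)) (j : Nat) : List Int :=
  (List.range (g.headD []).length).map (fun i => (g.getD i []).getD j 0)

def pvPossibles (row : List Int) : List Int :=
  ((List.range row.length).map (fun k => ((k : Int) + 1))).filter (fun x => !row.contains x)

-- body of A's innermost loop, over state (grid, solved)
def pvCellA (i j : Nat) (st : List (List Int) × Nat) : List (List Int) × Nat :=
  let g := st.1
  if (g.getD i []).getD j 0 == 0 then
    let rp := pvPossibles (g.getD i [])
    let cp := pvPossibles (pvGetColumn g j)
    let ps := rp.filter (fun x => cp.contains x)
    if ps.length == 1 then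
      (g.set i ((g.getD i []).set j (ps.getD 0 0)), st.2 + 1)
    else st
  else st

-- one pass of A's while-body: solved reset to 0, then the two nested for loops
def pvSweepA (g0 : List (List Int)) : List (List Int) × Nat :=
  (List.range g0.length).foldl (fun st i =>
    (List.range ((st.1.getD i []).length)).foldl (fun st j => pvCellA i j st) st)
    (g0, 0)

def pvLoopA : Nat → List (List Int) → List (List Int)
  | 0, g => g
  | fuel + 1, g =>
    let st := pvSweepA g
    if st.2 > 0 then pvLoopA fuel st.1 else st.1

def pvCountZeros (g : List (List Int)) : Nat := (g.map (fun r => r.count 0)).sum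

def solve_hidden_singles (grid : List (List Int)) : List (List Int) :=
  pvLoopA (pvCountZeros grid + 1) grid

-- ===== PORT B =====
-- body of B's innermost loop, over state (grid, row_used, col_used, changed)
def pvCellB (n i j : Nat)
    (st : List (List Int) × List (PySem.Set Int) × List (PySem.Set Int) × Bool) :
    List (List Int) × List (PySem.Set Int) × List (PySem.Set Int) × Bool :=
  let g := st.1
  let rs := st.2.1
  let cs := st.2.2.1
  if (g.getD i []).getD j 0 == 0 then
    let cands := ((List.range n).map (fun k => ((k : Int) + 1))).filter
      (fun d => !(rs.getD i []).contains d && !(cs.getD j []).contains d)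
    if cands.length == 1 then
      let d := cands.getD 0 0
      (g.set i ((g.getD i []).set j d),
       rs.set i (PySem.Set.add (rs.getD i []) d),
       cs.set j (PySem.Set.add (cs.getD j []) d),
       true)
    else st
  else st

def pvSweepB (n : Nat) (g0 : List (List Int)) (rs0 cs0 : List (PySem.Set Int)) :
    List (List Int) × List (PySem.Set Int) × List (PySem.Set Int) × Bool :=
  (List.range n).foldl (fun st i =>
    (List.range ((st.1.getD i []).length)).foldl (fun st j => pvCellB n i j st) st)
    (g0, rs0, cs0, false)

def pvLoopB (n : Nat) : Nat → List (List Int) → List (PySem.Set Int) → List (PySem.Set Int) →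
    List (List Int)
  | 0, g, _, _ => g
  | fuel + 1, g, rs, cs =>
    let st := pvSweepB n g rs cs
    if st.2.2.2 then pvLoopB n fuel st.1 st.2.1 st.2.2.1 else st.1

-- m = max(map(len, grid), default=0)
def pvMaxLen (g : List (List Int)) : Nat := (g.map List.length).foldl Nat.max 0

-- col_used = [set(row[j] for row in grid if j < len(row)) for j in range(m)]
def pvColUsedInit (g : List (List Int)) (m : Nat) : List (PySem.Set Int) :=
  (List.range m).map (fun j =>
    PySem.Set.ofList ((g.filter (fun row => decide (j < row.length))).map (fun row => row.getD j 0)))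

def solve_hidden_singles_alt (grid : List (List Int)) : List (List Int) :=
  let n := grid.length
  let m := pvMaxLen grid
  let rs := grid.map (fun row => PySem.Set.ofList row)
  let cs := pvColUsedInit grid m
  pvLoopB n (pvCountZeros grid + 1) grid rs cs

-- ===== PRECONDITION & SPEC =====
-- Pre_ admits square grids (the natural Sudoku domain) and arbitrary grids without empty (0)
-- cells (which both programs return unchanged); it excludes non-square grids containing a 0,
-- where A either raises IndexError in get_column or returns a value shaped by get_column's
-- accidental truncation of the column to len(grid[0]) rows — a corner outside the Sudoku domain
-- that no caller would specify.
def Pre_solve_hidden_singles (grid : List (List Int)) : Prop :=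
  (grid.all (fun row => row.length == grid.length)) = true ∨
  (grid.all (fun row => !row.contains 0)) = true

instance (grid : List (List Int)) : Decidable (Pre_solve_hidden_singles grid) := by
  unfold Pre_solve_hidden_singles; infer_instance

def pvWitness_solve_hidden_singles : List (List Int) := [[0, 2], [2, 0]]

def Spec_solve_hidden_singles (grid : List (List Int)) (out : List (List Int)) : Prop :=
  out = solve_hidden_singles_alt grid
instance (grid : List (List Int)) (out : List (List Int)) :
    Decidable (Spec_solve_hidden_singles grid out) := by
  unfold Spec_solve_hidden_singles; infer_instance

-- ===== CLAIM (what is proved, stated in full; the proofs are below) =====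
def Claim_equal_solve_hidden_singles : Prop :=
  ∀ (grid : List (List Int)), Dom_solve_hidden_singles grid →
    Pre_solve_hidden_singles grid →
    Spec_solve_hidden_singles grid (solve_hidden_singles grid)

-- ===== LEMMAS AND PROOFS =====

-- g is a square grid
def pvSquare (g : List (List Int)) : Prop := ∀ r ∈ g, r.length = g.length

-- column j of g, read over all rows
def pvColF (g : List (List Int)) (j : Nat) : List Int := g.map (fun row => row.getD j 0)

-- row_used invariant: same membership as the row, for nonzero values
def pvRInv (g : List (List Int)) (rs : List (PySem.Set Int)) : Prop :=
  rs.length = g.length ∧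
  ∀ i < g.length, ∀ d : Int, d ≠ 0 → (d ∈ rs.getD i [] ↔ d ∈ g.getD i [])

-- col_used invariant
def pvCInv (g : List (List Int)) (cs : List (PySem.Set Int)) : Prop :=
  cs.length = g.length ∧
  ∀ j < g.length, ∀ d : Int, d ≠ 0 → (d ∈ cs.getD j [] ↔ d ∈ pvColF g j)

-- relation between A'''s and B'''s sweep states
def pvRel (h : Nat) (stA : List (List Int) × Nat)
    (stB : List (List Int) × List (PySem.Set Int) × List (PySem.Set Int) × Bool) : Prop :=
  stB.1 = stA.1 ∧ stA.1.length = h ∧ pvSquare stA.1 ∧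
  pvRInv stA.1 stB.2.1 ∧ pvCInv stA.1 stB.2.2.1 ∧ stB.2.2.2 = decide (0 < stA.2)

theorem pv_mem_set_zero {l : List Int} {j : Nat} {d x : Int}
    (hj : j < l.length) (h0 : l[j] = 0) (hx : x ≠ 0) :
    x ∈ l.set j d ↔ x ∈ l ∨ x = d := by
  constructor
  · intro h
    rcases List.mem_or_eq_of_mem_set h with h | h
    · exact Or.inl h
    · exact Or.inr h
  · rintro (h | rfl)
    · rcases List.mem_iff_getElem.1 h with ⟨k, hk, hkx⟩
      have hkj : k ≠ j := by rintro rfl; exact hx (hkx ▸ h0 ▸ rfl)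
      refine List.mem_iff_getElem.2 ⟨k, by simpa using hk, ?_⟩
      rw [List.getElem_set]; simpa [Ne.symm hkj] using hkx
    · exact List.mem_iff_getElem.2 ⟨j, by simpa using hj, by rw [List.getElem_set]; simp⟩

theorem pv_getColumn_eq (g : List (List Int)) (j : Nat)
    (hs : pvSquare g) (hne : g ≠ []) :
    pvGetColumn g j = pvColF g j := by
  have hh : (g.headD []).length = g.length := by
    match g, hne with
    | r :: t, _ => exact hs r (by simp)
  unfold pvGetColumn pvColF
  rw [hh]
  apply List.ext_getElem
  · simp
  · intro i h1 h2
    simp [List.getD_eq_getElem?_getD, List.getElem?_eq_getElem (by simpa using h1)]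

theorem pv_getD_set_ne {α : Type} {l : List α} {j j' : Nat} {d e : α} (h : j' ≠ j) :
    (l.set j d).getD j' e = l.getD j' e := by
  simp [List.getD_eq_getElem?_getD, List.getElem?_set_ne (Ne.symm h)]

theorem pv_getD_set_self {α : Type} {l : List α} {j : Nat} {d e : α} (h : j < l.length) :
    (l.set j d).getD j e = d := by
  simp [List.getD_eq_getElem?_getD, h]

theorem pv_cellA_eq_cellB {h i j : Nat} {stA : List (List Int) × Nat}
    {stB : List (List Int) × List (PySem.Set Int) × List (PySem.Set Int) × Bool}
    (hR : pvRel h stA stB) (hi : i < h) (hj : j < h) :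
    pvRel h (pvCellA i j stA) (pvCellB h i j stB) := by
  obtain ⟨g2, s⟩ := stA
  obtain ⟨g, rs, cs, ch⟩ := stB
  obtain ⟨hBA, hlen, hsq, ⟨hrl, hr⟩, ⟨hcl, hc⟩, hch⟩ := hR
  simp only at hBA hlen hsq hrl hr hcl hc hch
  subst hBA
  have hig : i < g.length := hlen ▸ hi
  have hrow : g.getD i [] = g[i] := List.getD_eq_getElem g [] hig
  have hrowlen : (g.getD i []).length = h := by
    rw [hrow, hsq g[i] (List.getElem_mem hig)]; exact hlen
  have hjr : j < (g.getD i []).length := hrowlen ▸ hj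
  have hgne : g ≠ [] := by intro he; rw [he] at hig; simp at hig
  unfold pvCellA pvCellB
  simp only []
  by_cases hp : (g.getD i []).getD j 0 = 0
  · rw [hp]
    simp only [BEq.rfl, if_true]
    -- candidate lists are equal
    have hcol : pvGetColumn g j = pvColF g j := pv_getColumn_eq g j hsq hgne
    have hcollen : (pvGetColumn g j).length = h := by rw [hcol]; simp [pvColF, hlen]
    have hbase :
        (pvPossibles (g.getD i [])).filter (fun x => (pvPossibles (pvGetColumn g j)).contains x)
          = ((List.range h).map (fun k => ((k : Int) + 1))).filter
              (fun d => !(rs.getD i []).contains d && !(cs.getD j []).contains d) := by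
      unfold pvPossibles
      rw [hrowlen, hcollen, List.filter_filter]
      apply List.filter_congr
      intro x hx
      have hx' : ∃ a : ℕ, a < h ∧ ((a : Int) + 1 = x) := by simpa using hx
      obtain ⟨a, hah, hax⟩ := hx'
      have hx0 : x ≠ 0 := by omega
      have hcp : ((((List.range h).map (fun k => ((k : Int) + 1))).filter
          (fun x => !(pvGetColumn g j).contains x)).contains x)
          = !(pvColF g j).contains x := by
        rcases hb : (pvColF g j).contains x with _ | _
        · simp only [Bool.not_false]
          rw [List.contains_iff_mem, List.mem_filter]
          refine ⟨hx, ?_⟩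
          rw [hcol, hb]; rfl
        · simp only [Bool.not_true]
          rw [Bool.eq_false_iff]
          intro hmem
          rw [List.contains_iff_mem, List.mem_filter, hcol, hb] at hmem
          exact absurd hmem.2 (by simp)
      rw [hcp]
      have h1 : (rs.getD i []).contains x = (g.getD i []).contains x := by
        rw [Bool.eq_iff_iff]
        exact Iff.trans List.contains_iff_mem
          (Iff.trans (hr i hig _ hx0) List.contains_iff_mem.symm)
      have h2 : (cs.getD j []).contains x = (pvColF g j).contains x := by
        rw [Bool.eq_iff_iff]
        exact Iff.trans List.contains_iff_mem
          (Iff.trans (hc j (hlen ▸ hj) _ hx0) List.contains_iff_mem.symm)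
      rw [h1, h2, Bool.and_comm]
    rw [hbase]
    set cands := ((List.range h).map (fun k => ((k : Int) + 1))).filter
      (fun d => !(rs.getD i []).contains d && !(cs.getD j []).contains d) with hcands
    by_cases h1 : cands.length = 1
    · rw [h1]
      simp only [BEq.rfl, if_true]
      set d := cands.getD 0 0 with hd
      have hdmem : d ∈ cands := by
        have : 0 < cands.length := by omega
        rw [hd, List.getD_eq_getElem cands 0 this]
        exact List.getElem_mem this
      have hd0 : d ≠ 0 := by
        rw [hcands, List.mem_filter] at hdmem
        have : ∃ a : ℕ, a < h ∧ ((a : Int) + 1 = d) := by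
          have := hdmem.1
          simpa using this
        obtain ⟨a, _, had⟩ := this
        omega
      have hpj : (g.getD i [])[j] = 0 := by
        rw [← List.getD_eq_getElem _ _ hjr]; exact hp
      -- new grid
      set row' := (g.getD i []).set j d with hrow'
      set g' := g.set i row' with hg'
      have hglen' : g'.length = h := by rw [hg']; simpa using hlen
      have hsq' : pvSquare g' := by
        intro r hrmem
        rcases List.mem_or_eq_of_mem_set hrmem with hm | hm
        · rw [hglen']; rw [← hlen]; exact hsq r hm
        · rw [hm, hrow', List.length_set, hglen', hrowlen]
      refine ⟨rfl, hglen', hsq', ⟨?_, ?_⟩, ⟨?_, ?_⟩, by simp⟩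
      · simp [hg', hrl]
      · -- row invariant
        intro i' hi' x hx0
        by_cases hii : i' = i
        · subst hii
          rw [pv_getD_set_self (hrl ▸ hig), pv_getD_set_self (by simpa using hig)]
          rw [PySem.Set.mem_add, hrow', pv_mem_set_zero hjr hpj hx0]
          exact or_congr_left (hr i' hig x hx0)
        · rw [pv_getD_set_ne hii, pv_getD_set_ne hii]
          have : i' < g.length := by simpa [hg'] using hi'
          exact hr i' this x hx0
      · simp [hg', hcl]
      · -- column invariant
        intro j' hj' x hx0
        have hjg : j < g.length := hlen ▸ hj
        have hcolj : pvColF g' j' = (pvColF g j').set i (row'.getD j' 0) := by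
          rw [hg', pvColF, List.map_set]; rfl
        by_cases hjj : j' = j
        · subst hjj
          rw [pv_getD_set_self (hcl ▸ hjg), PySem.Set.mem_add, hcolj]
          have hrd : row'.getD j' 0 = d := by rw [hrow']; exact pv_getD_set_self hjr
          have hclen : (pvColF g j').length = g.length := by simp [pvColF]
          have hc0 : (pvColF g j')[i]'(hclen ▸ hig) = 0 := by
            simp only [pvColF, List.getElem_map]
            rw [List.getD_eq_getElem g [] hig] at hp
            exact hp
          rw [hrd, pv_mem_set_zero (hclen ▸ hig) hc0 hx0]
          exact or_congr_left (hc j' hjg x hx0)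
        · rw [pv_getD_set_ne hjj, hcolj]
          have hrd : row'.getD j' 0 = (g.getD i []).getD j' 0 := by
            rw [hrow']; exact pv_getD_set_ne hjj
          have hclen : (pvColF g j').length = g.length := by simp [pvColF]
          have hcv : (pvColF g j')[i]'(hclen ▸ hig) = (g.getD i []).getD j' 0 := by
            simp only [pvColF, List.getElem_map]
            rw [List.getD_eq_getElem g [] hig]
          rw [hrd, ← hcv, List.set_getElem_self]
          have : j' < g.length := by simpa [hg'] using hj'
          exact hc j' this x hx0
    · have : (cands.length == 1) = false := by simpa using h1
      rw [this]
      simp only [Bool.false_eq_true, if_false]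
      exact ⟨rfl, hlen, hsq, ⟨hrl, hr⟩, ⟨hcl, hc⟩, hch⟩
  · have : ((g.getD i []).getD j 0 == 0) = false := by simpa using hp
    rw [this]
    simp only [Bool.false_eq_true, if_false]
    exact ⟨rfl, hlen, hsq, ⟨hrl, hr⟩, ⟨hcl, hc⟩, hch⟩

theorem pv_fold_inner {h i : Nat} (hi : i < h) (l : List Nat) (hl : ∀ j ∈ l, j < h)
    {stA stB} (hR : pvRel h stA stB) :
    pvRel h (l.foldl (fun st j => pvCellA i j st) stA)
      (l.foldl (fun st j => pvCellB h i j st) stB) := by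
  induction l generalizing stA stB with
  | nil => exact hR
  | cons x t ih =>
    simp only [List.foldl_cons]
    exact ih (fun j hj => hl j (List.mem_cons_of_mem _ hj))
      (pv_cellA_eq_cellB hR hi (hl x (List.mem_cons_self)))

theorem pv_fold_outer {h : Nat} (l : List Nat) (hl : ∀ i ∈ l, i < h)
    {stA stB} (hR : pvRel h stA stB) :
    pvRel h
      (l.foldl (fun st i =>
        (List.range ((st.1.getD i []).length)).foldl (fun st j => pvCellA i j st) st) stA)
      (l.foldl (fun st i =>
        (List.range ((st.1.getD i []).length)).foldl (fun st j => pvCellB h i j st) st) stB) := by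
  induction l generalizing stA stB with
  | nil => exact hR
  | cons x t ih =>
    simp only [List.foldl_cons]
    have hx : x < h := hl x (List.mem_cons_self)
    have hrowlen : (stA.1.getD x []).length = h := by
      obtain ⟨_, hlen, hsq, _⟩ := hR
      have hxg : x < stA.1.length := hlen ▸ hx
      rw [List.getD_eq_getElem _ _ hxg, hsq _ (List.getElem_mem hxg), hlen]
    have hBA : stB.1 = stA.1 := hR.1
    rw [hrowlen, hBA, hrowlen]
    exact ih (fun i hi => hl i (List.mem_cons_of_mem _ hi))
      (pv_fold_inner hx _ (fun j hj => List.mem_range.1 hj) hR)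

theorem pv_sweep_rel {h : Nat} {g : List (List Int)} {rs cs : List (PySem.Set Int)}
    (hlen : g.length = h) (hs : pvSquare g) (hr : pvRInv g rs) (hc : pvCInv g cs) :
    pvRel h (pvSweepA g) (pvSweepB h g rs cs) := by
  unfold pvSweepA pvSweepB
  rw [hlen]
  exact pv_fold_outer _ (fun i hi => List.mem_range.1 hi)
    ⟨rfl, hlen, hs, hr, hc, by simp⟩

theorem pv_loop_eq {h : Nat} (fuel : Nat) :
    ∀ (g : List (List Int)) (rs cs : List (PySem.Set Int)),
    g.length = h → pvSquare g → pvRInv g rs → pvCInv g cs →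
    pvLoopB h fuel g rs cs = pvLoopA fuel g := by
  induction fuel with
  | zero => intro g rs cs _ _ _ _; rfl
  | succ fuel ih =>
    intro g rs cs hlen hs hr hc
    have hR := pv_sweep_rel hlen hs hr hc
    obtain ⟨hBA, hlen', hsq', hr', hc', hch⟩ := hR
    unfold pvLoopA pvLoopB
    simp only []
    rw [hch, hBA]
    by_cases hs0 : 0 < (pvSweepA g).2
    · simp only [hs0, decide_true, if_true]
      exact ih _ _ _ hlen' hsq' hr' hc'
    · simp only [hs0, decide_false, Bool.false_eq_true, if_false]

-- no entry of g is zero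
def pvNoZero (g : List (List Int)) : Prop := ∀ row ∈ g, ∀ x ∈ row, x ≠ (0 : Int)

theorem pv_maxLen_square {g : List (List Int)} (hsq : pvSquare g) :
    pvMaxLen g = g.length := by
  have hrep : g.map List.length = List.replicate g.length g.length := by
    rw [List.eq_replicate_iff]
    refine ⟨by simp, ?_⟩
    intro b hb
    obtain ⟨r, hr, rfl⟩ := List.mem_map.1 hb
    exact hsq r hr
  have haux : ∀ (k a n : Nat), (List.replicate k n).foldl Nat.max a =
      if k = 0 then a else Nat.max a n := by
    intro k
    induction k with
    | zero => intro a n; simp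
    | succ k ih =>
      intro a n
      simp only [List.replicate_succ, List.foldl_cons, ih]
      by_cases hk : k = 0 <;> simp [hk]
  unfold pvMaxLen
  rw [hrep, haux]
  by_cases hg : g.length = 0 <;> simp [hg]

theorem pv_cellA_fix {g : List (List Int)} {s i j : Nat}
    (hz : pvNoZero g) (hi : i < g.length) (hj : j < (g.getD i []).length) :
    pvCellA i j (g, s) = (g, s) := by
  have hmem : (g.getD i []).getD j 0 ∈ g.getD i [] := by
    rw [List.getD_eq_getElem _ _ hj]
    exact List.getElem_mem hj
  have hne : (g.getD i []).getD j 0 ≠ 0 := by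
    refine hz (g.getD i []) ?_ _ hmem
    rw [List.getD_eq_getElem _ _ hi]
    exact List.getElem_mem hi
  have hcond : (((g.getD i []).getD j 0) == (0 : Int)) = false := by
    simpa using hne
  unfold pvCellA
  simp only [hcond, Bool.false_eq_true, if_false]

theorem pv_cellB_fix {n i j : Nat} {g : List (List Int)}
    {rs cs : List (PySem.Set Int)} {ch : Bool}
    (hz : pvNoZero g) (hi : i < g.length) (hj : j < (g.getD i []).length) :
    pvCellB n i j (g, rs, cs, ch) = (g, rs, cs, ch) := by
  have hmem : (g.getD i []).getD j 0 ∈ g.getD i [] := by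
    rw [List.getD_eq_getElem _ _ hj]
    exact List.getElem_mem hj
  have hne : (g.getD i []).getD j 0 ≠ 0 := by
    refine hz (g.getD i []) ?_ _ hmem
    rw [List.getD_eq_getElem _ _ hi]
    exact List.getElem_mem hi
  have hcond : (((g.getD i []).getD j 0) == (0 : Int)) = false := by
    simpa using hne
  unfold pvCellB
  simp only [hcond, Bool.false_eq_true, if_false]

theorem pv_sweepA_nozero {g : List (List Int)} (hz : pvNoZero g) :
    pvSweepA g = (g, 0) := by
  unfold pvSweepA
  have houter : ∀ (l : List Nat), (∀ i ∈ l, i < g.length) → ∀ s : Nat,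
      l.foldl (fun st i =>
        (List.range ((st.1.getD i []).length)).foldl (fun st j => pvCellA i j st) st) (g, s)
      = (g, s) := by
    intro l
    induction l with
    | nil => intro _ s; rfl
    | cons x t ih =>
      intro hl s
      simp only [List.foldl_cons]
      have hx : x < g.length := hl x (List.mem_cons_self)
      have hinner : ∀ (l2 : List Nat), (∀ j ∈ l2, j < (g.getD x []).length) →
          l2.foldl (fun st j => pvCellA x j st) ((g, s) : List (List Int) × Nat) = (g, s) := by
        intro l2
        induction l2 with
        | nil => intro _; rfl
        | cons y t2 ih2 =>
          intro hl2
          simp only [List.foldl_cons]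
          rw [pv_cellA_fix hz hx (hl2 y (List.mem_cons_self))]
          exact ih2 (fun j hj => hl2 j (List.mem_cons_of_mem _ hj))
      rw [hinner _ (fun j hj => List.mem_range.1 hj)]
      exact ih (fun i hi => hl i (List.mem_cons_of_mem _ hi)) s
  exact houter _ (fun i hi => List.mem_range.1 hi) 0

theorem pv_sweepB_nozero {g : List (List Int)} {rs cs : List (PySem.Set Int)}
    (hz : pvNoZero g) :
    pvSweepB g.length g rs cs = (g, rs, cs, false) := by
  unfold pvSweepB
  have houter : ∀ (l : List Nat), (∀ i ∈ l, i < g.length) →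
      l.foldl (fun st i =>
        (List.range ((st.1.getD i []).length)).foldl (fun st j => pvCellB g.length i j st) st)
        (g, rs, cs, false)
      = (g, rs, cs, false) := by
    intro l
    induction l with
    | nil => intro _; rfl
    | cons x t ih =>
      intro hl
      simp only [List.foldl_cons]
      have hx : x < g.length := hl x (List.mem_cons_self)
      have hinner : ∀ (l2 : List Nat), (∀ j ∈ l2, j < (g.getD x []).length) →
          l2.foldl (fun st j => pvCellB g.length x j st)
            ((g, rs, cs, false) :
              List (List Int) × List (PySem.Set Int) × List (PySem.Set Int) × Bool)
          = (g, rs, cs, false) := by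
        intro l2
        induction l2 with
        | nil => intro _; rfl
        | cons y t2 ih2 =>
          intro hl2
          simp only [List.foldl_cons]
          rw [pv_cellB_fix hz hx (hl2 y (List.mem_cons_self))]
          exact ih2 (fun j hj => hl2 j (List.mem_cons_of_mem _ hj))
      rw [hinner _ (fun j hj => List.mem_range.1 hj)]
      exact ih (fun i hi => hl i (List.mem_cons_of_mem _ hi))
  exact houter _ (fun i hi => List.mem_range.1 hi)

theorem pv_main_square (grid : List (List Int))
    (hpre : (grid.all (fun row => row.length == grid.length)) = true) :
    solve_hidden_singles grid = solve_hidden_singles_alt grid := by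
  have hsq : pvSquare grid := by
    intro r hr
    have := List.all_eq_true.1 hpre r hr
    simpa using this
  have hr0 : pvRInv grid (grid.map (fun row => PySem.Set.ofList row)) := by
    refine ⟨by simp, ?_⟩
    intro i hi d _
    rw [List.getD_eq_getElem _ _ (by simpa using hi), List.getElem_map,
      List.getD_eq_getElem _ _ hi]
    exact PySem.Set.mem_ofList _ d
  have hm : pvMaxLen grid = grid.length := pv_maxLen_square hsq
  have hc0 : pvCInv grid (pvColUsedInit grid (pvMaxLen grid)) := by
    refine ⟨by simp [pvColUsedInit, hm], ?_⟩
    intro j hj d _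
    have hj' : j < pvMaxLen grid := hm ▸ hj
    unfold pvColUsedInit
    rw [List.getD_eq_getElem _ _ (by simpa using hj'), List.getElem_map, List.getElem_range]
    have hfil : grid.filter (fun row => decide (j < row.length)) = grid := by
      apply List.filter_eq_self.2
      intro r hr
      simp [hsq r hr, hj]
    rw [hfil]
    exact PySem.Set.mem_ofList _ d
  have := pv_loop_eq (h := grid.length) (pvCountZeros grid + 1) grid _ _ rfl hsq hr0 hc0
  unfold solve_hidden_singles solve_hidden_singles_alt
  exact this.symm

theorem pv_main_nozero (grid : List (List Int))
    (hpre : (grid.all (fun row => !row.contains 0)) = true) :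
    solve_hidden_singles grid = solve_hidden_singles_alt grid := by
  have hz : pvNoZero grid := by
    intro row hrow x hx hx0
    have := List.all_eq_true.1 hpre row hrow
    rw [Bool.not_eq_eq_eq_not, Bool.not_true, Bool.eq_false_iff] at this
    exact this (List.contains_iff_mem.2 (hx0 ▸ hx))
  unfold solve_hidden_singles solve_hidden_singles_alt
  simp only [pvLoopA, pvLoopB, pv_sweepA_nozero hz, pv_sweepB_nozero hz]
  simp

-- ===== VERDICT (by name: the statement is the Claim_ definition above) =====
theorem solve_hidden_singles_spec : Claim_equal_solve_hidden_singles := by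
  intro grid _ hpre
  rcases hpre with hsq | hz
  · exact pv_main_square grid hsq
  · exact pv_main_nozero grid hz
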